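-- pv_equiv track=rewrite | github.com/raulandrei00/Polytechnique_L1 | advanced python/final.py | generate_meanders
-- ===== SOURCE A (Python) =====
-- def generate_meanders(n,k):
--     if (n == 0 and k == 0):
--         yield []
--     if (n == 0 or k < 0 or abs(k) > n): return
--
--     up = generate_meanders(n-1,k+1)
--     down = generate_meanders(n-1,k-1)
--
--     for crt in up:
--         yield crt + [-1]
--     for crt in down:
--         yield crt + [1]
-- ===== SOURCE B (Python) =====
-- def generate_meanders(n, k):
--     # Bottom-up DP over path length m: rows[j] holds every length-m prefix at level j
--     # that can still reach level k (|k - j| <= n - m).  Each state is computed once,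
--     # instead of A's repeated re-enumeration of shared subproblems.
--     if k < 0 or k > n or (n + k) % 2 == 1:
--         return
--     rows = {0: [[]]}
--     for m in range(1, n + 1):
--         lo = max(0, k - (n - m))
--         hi = min(m, k + (n - m))
--         new = {}
--         for j in range(lo, hi + 1):
--             paths = [p + [-1] for p in rows.get(j + 1, [])]
--             if j >= 1:
--                 paths += [p + [1] for p in rows.get(j - 1, [])]
--             if paths:
--                 new[j] = paths
--         rows = new
--     yield from rows.get(k, [])
-- ===== Notes on version B (the rewrite author's own statement) =====
-- stated objective: alternative
-- what changed: Replaces A's top-down generator recursion (which re-enumerates shared (length,level) subproblems and rebuilds each path at every recursion level) by a single bottom-up dynamic-programming pass that extends each stored prefix once per level, restricted to levels that can still reach k, with an O(1) parity/range emptiness check up front.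
import Mathlib
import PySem

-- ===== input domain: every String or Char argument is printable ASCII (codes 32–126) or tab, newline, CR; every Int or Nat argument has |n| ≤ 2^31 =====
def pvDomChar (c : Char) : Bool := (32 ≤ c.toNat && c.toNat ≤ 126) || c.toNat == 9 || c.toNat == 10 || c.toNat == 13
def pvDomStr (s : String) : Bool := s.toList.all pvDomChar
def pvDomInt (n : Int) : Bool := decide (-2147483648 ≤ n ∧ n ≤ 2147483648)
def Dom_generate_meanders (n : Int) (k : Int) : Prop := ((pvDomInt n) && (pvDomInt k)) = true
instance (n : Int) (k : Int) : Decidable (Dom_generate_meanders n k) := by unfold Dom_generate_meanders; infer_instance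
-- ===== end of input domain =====

-- B replaces A's exponential re-enumerating recursion by a bottom-up DP over path length
-- (one pass per level, pruned to states that can still reach k): an alternative algorithm.


-- ===== PORT A =====
-- Literal port of A: the generator's yields collected in order.
def generate_meanders (n : Int) (k : Int) : List (List Int) :=
  (if n = 0 ∧ k = 0 then [[]] else []) ++
  (if n = 0 ∨ k < 0 ∨ |k| > n then []
   else
     (generate_meanders (n - 1) (k + 1)).map (fun crt => crt ++ [-1]) ++
     (generate_meanders (n - 1) (k - 1)).map (fun crt => crt ++ [1]))
termination_by n.toNat
decreasing_by
  all_goals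
    simp only [not_or, not_lt] at *
    have hk := abs_nonneg k
    have hn : 0 < n := by
      rcases ‹n ≠ 0 ∧ 0 ≤ k ∧ |k| ≤ n› with ⟨h1, _, h3⟩
      have : (0:Int) ≤ n := le_trans hk h3
      omega
    omega

-- ===== PORT B =====
-- paths = [p + [-1] for p in rows.get(j+1, [])] (+ [p + [1] for p in rows.get(j-1, [])] if j >= 1)
def gmPaths (rows : PySem.Dict Int (List (List Int))) (j : Int) : List (List Int) :=
  ((PySem.Dict.getD rows (j + 1) []).map (fun p => p ++ [-1])) ++
  (if 1 ≤ j then (PySem.Dict.getD rows (j - 1) []).map (fun p => p ++ [1]) else [])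

-- the body of B's outer loop: one DP level m
def gmStep (n : Int) (k : Int) (rows : PySem.Dict Int (List (List Int))) (m : Int) :
    PySem.Dict Int (List (List Int)) :=
  (PySem.List.pyRange (max 0 (k - (n - m))) (min m (k + (n - m)) + 1) 1).foldl
    (fun new j => if gmPaths rows j = [] then new else PySem.Dict.insert new j (gmPaths rows j))
    PySem.Dict.empty

def generate_meanders_alt (n : Int) (k : Int) : List (List Int) :=
  if k < 0 ∨ k > n ∨ PySem.Int.mod (n + k) 2 = 1 then []
  else
    PySem.Dict.getD
      ((PySem.List.pyRange 1 (n + 1) 1).foldl (gmStep n k)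
        (PySem.Dict.ofList [(0, [[]])])) k []

-- ===== PRECONDITION & SPEC =====
-- Pre_ excludes exactly the crash band 0 ≤ k ≤ n with n > 995: there, iterating A's
-- nested-generator recursion needs n+1 stacked frames, which exhausts CPython's default
-- recursion limit of 1000, so A raises RecursionError instead of returning.
def Pre_generate_meanders (n : Int) (k : Int) : Prop := k < 0 ∨ n < k ∨ n ≤ 995
instance (n : Int) (k : Int) : Decidable (Pre_generate_meanders n k) := by unfold Pre_generate_meanders; infer_instance
def pvWitness_generate_meanders : Int × Int := (4, 2)

def Spec_generate_meanders (n : Int) (k : Int) (out : List (List Int)) : Prop := out = generate_meanders_alt n k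
instance (n : Int) (k : Int) (out : List (List Int)) : Decidable (Spec_generate_meanders n k out) := by unfold Spec_generate_meanders; infer_instance

-- ===== CLAIM (what is proved, stated in full; the proofs are below) =====
def Claim_equal_generate_meanders : Prop := ∀ (n : Int) (k : Int), Dom_generate_meanders n k → Pre_generate_meanders n k → Spec_generate_meanders n k (generate_meanders n k)

-- ===== LEMMAS AND PROOFS =====

-- A returns nothing when the target level is negative or unreachable above
theorem gm_out (n k : Int) (h : k < 0 ∨ n < k) : generate_meanders n k = [] := by
  rw [generate_meanders]
  have h1 : ¬ (n = 0 ∧ k = 0) := by rintro ⟨rfl, rfl⟩; omega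
  have h2 : n = 0 ∨ k < 0 ∨ |k| > n := by
    rcases h with h | h
    · right; left; exact h
    · by_cases hk : k < 0
      · right; left; exact hk
      · right; right; rw [abs_of_nonneg (by omega)]; omega
  simp [h1, h2]

-- A returns nothing when n + k is odd (each step flips the parity)
theorem gm_parity (N : Nat) : ∀ (n k : Int), n = (N : Int) → (n + k) % 2 = 1 →
    generate_meanders n k = [] := by
  induction N with
  | zero =>
    intro n k hn hpar
    have hn0 : n = 0 := by exact_mod_cast hn
    subst hn0
    rw [generate_meanders]
    have hk0 : k ≠ 0 := by omega
    simp [hk0]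
  | succ N ih =>
    intro n k hn hpar
    rw [generate_meanders]
    have h1 : ¬ (n = 0 ∧ k = 0) := by rintro ⟨rfl, rfl⟩; omega
    have hne : n ≠ 0 := by omega
    by_cases h2 : n = 0 ∨ k < 0 ∨ |k| > n
    · simp [h1, h2]
    · have e1 : generate_meanders (n - 1) (k + 1) = [] := ih (n - 1) (k + 1) (by omega) (by omega)
      have e2 : generate_meanders (n - 1) (k - 1) = [] := ih (n - 1) (k - 1) (by omega) (by omega)
      simp [hne, h2, e1, e2]

-- a fold over range(lo, lo+L) inserting (j ↦ paths j) for nonempty paths, read back with getD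
theorem getD_foldRange (paths : Int → List (List Int)) (lo : Int) (L : Nat) (j : Int) :
    PySem.Dict.getD
      ((PySem.List.pyRange lo (lo + (L : Int)) 1).foldl
        (fun new j => if paths j = [] then new else PySem.Dict.insert new j (paths j))
        PySem.Dict.empty) j []
    = if lo ≤ j ∧ j < lo + (L : Int) then paths j else [] := by
  induction L with
  | zero =>
    rw [PySem.List.pyRange_one_eq_nil (by omega)]
    simp only [List.foldl_nil, PySem.Dict.getD_empty]
    have : ¬ (lo ≤ j ∧ j < lo + ((0:Nat) : Int)) := by push_cast; omega
    simp [this]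
  | succ L ih =>
    have hcast : lo + ((L + 1 : Nat) : Int) = (lo + (L : Int)) + 1 := by push_cast; ring
    rw [hcast, PySem.List.pyRange_one_succ_right (by omega), List.foldl_append]
    simp only [List.foldl_cons, List.foldl_nil]
    by_cases hemp : paths (lo + (L : Int)) = []
    · rw [if_pos hemp, ih]
      by_cases hj : j = lo + (L : Int)
      · subst hj
        rw [if_neg (by omega), if_pos (by omega), hemp]
      · split_ifs with c1 c2 <;> first | rfl | omega
    · rw [if_neg hemp, PySem.Dict.getD_insert]
      by_cases hj : j = lo + (L : Int)
      · subst hj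
        rw [if_pos rfl, if_pos (by omega)]
      · rw [if_neg hj, ih]
        split_ifs with c1 c2 <;> first | rfl | omega

-- one DP step preserves the window invariant
theorem gmStep_inv (n k m : Int) (rows : PySem.Dict Int (List (List Int)))
    (hk : 0 ≤ k) (hkn : k ≤ n) (hm : 1 ≤ m) (hmn : m ≤ n)
    (h : ∀ j : Int, PySem.Dict.getD rows j [] =
      if k - (n - (m - 1)) ≤ j ∧ j ≤ k + (n - (m - 1)) then generate_meanders (m - 1) j else []) :
    ∀ j : Int, PySem.Dict.getD (gmStep n k rows m) j [] =
      if k - (n - m) ≤ j ∧ j ≤ k + (n - m) then generate_meanders m j else [] := by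
  intro j
  set lo := max 0 (k - (n - m)) with hlo
  set hi := min m (k + (n - m)) with hhi
  have hhi1 : hi ≤ m := min_le_left _ _
  have hhi2 : hi ≤ k + (n - m) := min_le_right _ _
  have hhi3 : (0:Int) ≤ hi := le_min (by omega) (by omega)
  have hlo1 : (0:Int) ≤ lo := le_max_left _ _
  have hlo2 : k - (n - m) ≤ lo := le_max_right _ _
  have hlo3 : lo ≤ hi := max_le hhi3 (le_min (by omega) (by omega))
  have hloc : lo = 0 ∨ lo = k - (n - m) := max_choice _ _
  have hhic : hi = m ∨ hi = k + (n - m) := min_choice _ _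
  clear_value lo hi
  have hrange : (gmStep n k rows m) =
      (PySem.List.pyRange lo (hi + 1) 1).foldl
        (fun new j => if gmPaths rows j = [] then new else PySem.Dict.insert new j (gmPaths rows j))
        PySem.Dict.empty := by
    rw [gmStep, ← hlo, ← hhi]
  rw [hrange, show hi + 1 = lo + (((hi + 1 - lo).toNat : Nat) : Int) by omega, getD_foldRange]
  have hwin : ∀ i : Int, (lo ≤ i ∧ i < lo + ((hi + 1 - lo).toNat : Int)) ↔ (lo ≤ i ∧ i ≤ hi) := by
    intro i; omega
  -- value of gmPaths on an in-window j equals generate_meanders m j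
  have hval : ∀ i : Int, lo ≤ i → i ≤ hi → gmPaths rows i = generate_meanders m i := by
    intro i h1 h2
    have hup : PySem.Dict.getD rows (i + 1) [] = generate_meanders (m - 1) (i + 1) := by
      rw [h]; rw [if_pos]; omega
    have hdn : PySem.Dict.getD rows (i - 1) [] = generate_meanders (m - 1) (i - 1) := by
      rw [h]; rw [if_pos]; omega
    rw [generate_meanders]
    have g1 : ¬ (m = 0 ∧ i = 0) := by rintro ⟨rfl, _⟩; omega
    have g2 : ¬ (m = 0 ∨ i < 0 ∨ |i| > m) := by
      push_neg
      refine ⟨by omega, by omega, ?_⟩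
      rw [abs_of_nonneg (by omega)]; omega
    rw [if_neg g1, if_neg g2, List.nil_append, gmPaths, hup, hdn]
    by_cases hi1 : 1 ≤ i
    · rw [if_pos hi1]
    · rw [if_neg hi1]
      have hi0 : i = 0 := by omega
      subst hi0
      have hneg : generate_meanders (m - 1) ((0:Int) - 1) = [] := gm_out _ _ (by omega)
      rw [hneg, List.map_nil, List.append_nil]
  by_cases hin : lo ≤ j ∧ j ≤ hi
  · rw [if_pos ((hwin j).mpr hin), hval j hin.1 hin.2, if_pos (by omega)]
  · rw [if_neg (fun c => hin ((hwin j).mp c))]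
    by_cases hw : k - (n - m) ≤ j ∧ j ≤ k + (n - m)
    · rw [if_pos hw]
      -- j is in the reachability window but outside [lo,hi]: j < 0 or j > m, so A is empty
      exact (gm_out m j (by omega)).symm
    · rw [if_neg hw]

-- the DP rows after processing levels 1..M satisfy the window invariant
theorem gmFold_inv (n k : Int) (hk : 0 ≤ k) (hkn : k ≤ n) :
    ∀ (M : Nat), (M : Int) ≤ n →
      ∀ j : Int,
        PySem.Dict.getD
          ((PySem.List.pyRange 1 ((M : Int) + 1) 1).foldl (gmStep n k)
            (PySem.Dict.ofList [(0, [[]])])) j []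
        = if k - (n - (M : Int)) ≤ j ∧ j ≤ k + (n - (M : Int)) then generate_meanders (M : Int) j else [] := by
  intro M
  induction M with
  | zero =>
    intro _ j
    rw [PySem.List.pyRange_one_eq_nil (by omega)]
    simp only [List.foldl_nil, Nat.cast_zero]
    by_cases hj : j = 0
    · subst hj
      rw [if_pos (by omega)]
      rw [generate_meanders]
      simp [PySem.Dict.ofList, PySem.Dict.update, PySem.Dict.getD_insert]
    · have hz : generate_meanders 0 j = [] := by
        rw [generate_meanders]
        simp [hj]
      have : PySem.Dict.getD (PySem.Dict.ofList [((0:Int), [([] : List Int)])]) j [] = [] := by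
        simp [PySem.Dict.ofList, PySem.Dict.update, PySem.Dict.getD_insert, hj]
      rw [this, hz]
      split_ifs <;> rfl
  | succ M ih =>
    intro hMn j
    have hcast : ((M + 1 : Nat) : Int) + 1 = ((M : Int) + 1) + 1 := by push_cast; ring
    rw [hcast, PySem.List.pyRange_one_succ_right (by omega), List.foldl_append]
    simp only [List.foldl_cons, List.foldl_nil]
    have hstep := gmStep_inv n k ((M : Int) + 1)
      ((PySem.List.pyRange 1 ((M : Int) + 1) 1).foldl (gmStep n k) (PySem.Dict.ofList [(0, [[]])]))
      hk hkn (by omega) (by push_cast at hMn ⊢; omega)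
      (by
        intro j'
        have := ih (by push_cast at hMn; omega) j'
        simpa using this)
    have := hstep j
    simpa using this

-- ===== VERDICT (by name: the statement is the Claim_ definition above) =====
theorem generate_meanders_spec : Claim_equal_generate_meanders := by
  intro n k _ _
  unfold Spec_generate_meanders
  rw [generate_meanders_alt]
  by_cases hout : k < 0 ∨ k > n
  · rw [if_pos (by tauto), gm_out n k (by omega)]
  · push_neg at hout
    obtain ⟨hk, hkn⟩ := hout
    by_cases hpar : PySem.Int.mod (n + k) 2 = 1
    · rw [if_pos (by tauto)]
      have hm : (n + k) % 2 = 1 := by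
        rw [← PySem.Int.mod_eq_emod_of_pos (by omega : (0:Int) < 2)]
        exact hpar
      exact gm_parity n.toNat n k (by omega) hm
    · rw [if_neg (by push_neg; exact ⟨by omega, by omega, hpar⟩)]
      have hinv := gmFold_inv n k hk hkn n.toNat (by omega) k
      have hcast : ((n.toNat : Int)) = n := by omega
      rw [hcast] at hinv
      rw [hinv, if_pos (by omega)]
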